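-- pv_equiv track=rewrite | github.com/vertz/bioinformatics | week4+5/week4.py | graph_degrees
-- ===== SOURCE A (Python) =====
-- def graph_degrees(graph):
--     if not graph:
--         raise Exception("Empty graph")
--
--     # degrees[u] = [in(u),out(u)]
--     degrees = {}
--
--     for v in graph.keys():
--         neighbors = graph[v]
--         out_degree = len(neighbors)
--
--         if v in degrees:
--             degrees[v][1] = out_degree
--         else:
--             degrees[v] = [0, out_degree]
--
--         for u in neighbors:
--             if u in degrees:
--                 degrees[u][0] += 1
--             else:
--                 degrees[u] = [1,0]
--
--     return degrees
-- ===== SOURCE B (Python) =====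
-- from collections import Counter
--
--
-- def graph_degrees(graph):
--     if not graph:
--         raise Exception("Empty graph")
--     out_counts = {v: len(vs) for v, vs in graph.items()}
--     in_counts = Counter(u for vs in graph.values() for u in vs)
--     order = dict.fromkeys(x for v, vs in graph.items() for x in (v, *vs))
--     return {x: [in_counts.get(x, 0), out_counts.get(x, 0)] for x in order}
-- ===== Notes on version B (the rewrite author's own statement) =====
-- stated objective: idiomatic
-- what changed: A's single interleaved pass that mutates [in,out] cells in one dict is replaced by three independent passes joined at the end: a dict comprehension for out-degrees, a collections.Counter over all neighbors for in-degrees, and dict.fromkeys to fix the first-occurrence key order.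
import Mathlib
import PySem

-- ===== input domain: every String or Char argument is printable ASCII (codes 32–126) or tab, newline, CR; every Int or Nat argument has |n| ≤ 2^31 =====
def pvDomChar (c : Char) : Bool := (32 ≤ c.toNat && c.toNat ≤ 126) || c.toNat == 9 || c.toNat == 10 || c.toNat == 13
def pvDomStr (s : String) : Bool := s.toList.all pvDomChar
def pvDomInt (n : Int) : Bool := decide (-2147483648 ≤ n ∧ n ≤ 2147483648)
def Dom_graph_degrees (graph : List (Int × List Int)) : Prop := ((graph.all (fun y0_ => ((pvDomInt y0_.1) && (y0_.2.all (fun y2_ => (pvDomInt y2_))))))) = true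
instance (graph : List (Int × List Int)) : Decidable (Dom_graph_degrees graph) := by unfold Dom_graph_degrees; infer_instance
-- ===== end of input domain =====

-- B replaces A's single interleaved mutating pass by three independent passes (out-degrees, an
-- in-degree Counter, a first-occurrence key order) joined at the end; same cost, more idiomatic.

-- ===== PORT A =====
-- the [in, out] cell surgeries: `degrees[u][0] += 1` and `degrees[v][1] = out_degree`
-- (exact on the two-element cells A's loop builds; A never reaches shorter cells)
def pvIncIn : List Int → List Int
  | a :: rest => (a + 1) :: rest
  | [] => []

def pvSetOut (out : Int) : List Int → List Int
  | a :: _ :: rest => a :: out :: rest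
  | l => l

-- body of `for u in neighbors: …`
def pvStepIn (d : PySem.Dict Int (List Int)) (u : Int) : PySem.Dict Int (List Int) :=
  if d.contains u then d.insert u (pvIncIn (d.getD u [])) else d.insert u [1, 0]

-- body of `for v in graph.keys(): …`
def pvStepA (d : PySem.Dict Int (List Int)) (p : Int × List Int) : PySem.Dict Int (List Int) :=
  let v := p.1
  let neighbors := p.2
  let out_degree : Int := neighbors.length
  let d1 := if d.contains v then d.insert v (pvSetOut out_degree (d.getD v []))
            else d.insert v [0, out_degree]
  neighbors.foldl pvStepIn d1

def graph_degrees (graph : List (Int × List Int)) : List (Int × List Int) :=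
  -- `if not graph: raise Exception("Empty graph")` — the empty graph is excluded by Pre_
  (graph.foldl pvStepA PySem.Dict.empty).items

-- ===== PORT B =====
def graph_degrees_alt (graph : List (Int × List Int)) : List (Int × List Int) :=
  let out_counts : PySem.Dict Int Int :=
    PySem.Dict.ofList (graph.map (fun p => (p.1, (p.2.length : Int))))
  let in_counts : PySem.Dict Int Int :=
    PySem.Dict.counter (graph.flatMap (fun p => p.2))
  let order : List Int := PySem.List.dedup (graph.flatMap (fun p => p.1 :: p.2))
  order.map (fun x => (x, [in_counts.getD x 0, out_counts.getD x 0]))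

-- ===== PRECONDITION & SPEC =====
-- Pre_ excludes the empty graph (A raises Exception("Empty graph")) and association lists with
-- duplicate keys, which do not represent any Python dict input A can receive.
def Pre_graph_degrees (graph : List (Int × List Int)) : Prop :=
  graph ≠ [] ∧ (graph.map Prod.fst).Nodup
instance (graph : List (Int × List Int)) : Decidable (Pre_graph_degrees graph) := by
  unfold Pre_graph_degrees; infer_instance

def pvWitness_graph_degrees : (List (Int × List Int)) := [(1, [2, 1]), (2, [])]

def Spec_graph_degrees (graph : List (Int × List Int)) (out : List (Int × List Int)) : Prop := out = graph_degrees_alt graph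
instance (graph : List (Int × List Int)) (out : List (Int × List Int)) : Decidable (Spec_graph_degrees graph out) := by unfold Spec_graph_degrees; infer_instance

-- ===== CLAIM (what is proved, stated in full; the proofs are below) =====
def Claim_equal_graph_degrees : Prop := ∀ (graph : List (Int × List Int)), Dom_graph_degrees graph → Pre_graph_degrees graph → Spec_graph_degrees graph (graph_degrees graph)

-- ===== LEMMAS AND PROOFS =====

-- the key/neighbor chain, the flattened neighbor lists and the out-degree of x, read off the input
def pvChain (l : List (Int × List Int)) : List Int := l.flatMap (fun p => p.1 :: p.2)
def pvFlats (l : List (Int × List Int)) : List Int := l.flatMap (fun p => p.2)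
def pvOut (l : List (Int × List Int)) (x : Int) : Int :=
  match l.find? (fun p => p.1 == x) with
  | some p => (p.2.length : Int)
  | none => 0

lemma pvStepIn_eq_insert (d : PySem.Dict Int (List Int)) (u : Int) :
    pvStepIn d u = d.insert u (if d.contains u then pvIncIn (d.getD u []) else [1, 0]) := by
  unfold pvStepIn; split_ifs <;> rfl

lemma pvOut_eq_zero_of_not_key (l : List (Int × List Int)) (x : Int)
    (h : x ∉ l.map Prod.fst) : pvOut l x = 0 := by
  unfold pvOut
  have : l.find? (fun p => p.1 == x) = none := by
    rw [List.find?_eq_none]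
    intro p hp hbeq
    exact h (List.mem_map.mpr ⟨p, hp, by simpa using hbeq⟩)
  rw [this]

-- the inner `for u in neighbors` loop, on any dict whose cells are [cin x, cout x]
lemma pvInner_get? (ns : List Int) :
    ∀ (D : PySem.Dict Int (List Int)) (cin cout : Int → Int),
    (∀ x, D.get? x = if x ∈ D.keys then some [cin x, cout x] else none) →
    ∀ x, (ns.foldl pvStepIn D).get? x =
      if x ∈ D.keys ∨ x ∈ ns then
        some [(if x ∈ D.keys then cin x else 0) + (ns.count x : Int),
              if x ∈ D.keys then cout x else 0]
      else none := by
  induction ns with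
  | nil =>
    intro D cin cout h x
    simp only [List.foldl_nil, List.not_mem_nil, or_false, List.count_nil, Int.natCast_zero,
      add_zero, h x]
    by_cases hx : x ∈ D.keys <;> simp [hx]
  | cons u ns ih =>
    intro D cin cout h x
    rw [List.foldl_cons]
    by_cases hu : u ∈ D.keys
    · have hc : D.contains u = true := by
        rw [PySem.Dict.contains_eq_decide_mem_keys]; simpa using hu
      have hgd : D.getD u [] = [cin u, cout u] := by
        rw [PySem.Dict.getD_eq_get?_getD, h u, if_pos hu]; rfl
      have hstep : pvStepIn D u = D.insert u [cin u + 1, cout u] := by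
        rw [pvStepIn_eq_insert, if_pos hc, hgd]; rfl
      rw [hstep]
      have hkeys : ∀ y, y ∈ (D.insert u ([cin u + 1, cout u] : List Int)).keys ↔ y ∈ D.keys := by
        intro y
        rw [PySem.Dict.mem_keys_insert]
        constructor
        · rintro (rfl | hy) <;> [exact hu; exact hy]
        · exact Or.inr
      have := ih (D.insert u [cin u + 1, cout u])
        (fun y => if y = u then cin u + 1 else cin y) cout
        (by
          intro y
          rw [PySem.Dict.get?_insert]
          by_cases hy : y = u
          · subst hy; simp [hkeys, hu]
          · rw [if_neg hy, h y]
            simp only [hkeys]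
            by_cases hy' : y ∈ D.keys <;> simp [hy', hy]) x
      rw [this]
      simp only [hkeys, List.mem_cons, List.count_cons]
      by_cases hx : x ∈ D.keys
      · by_cases hxu : x = u
        · subst hxu
          simp [hx]
          ring
        · simp [hx, hxu, Ne.symm hxu]
      · have hxu : ¬ x = u := fun hh => hx (hh ▸ hu)
        simp [hx, hxu, Ne.symm hxu]
    · have hc : D.contains u = false := by
        rw [PySem.Dict.contains_eq_decide_mem_keys]; simpa using hu
      have hstep : pvStepIn D u = D.insert u [1, 0] := by
        rw [pvStepIn_eq_insert, if_neg (by simp [hc])]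
      rw [hstep]
      have hkeys : ∀ y, y ∈ (D.insert u ([1, 0] : List Int)).keys ↔ y = u ∨ y ∈ D.keys := by
        intro y; exact PySem.Dict.mem_keys_insert _ _ _ _
      have := ih (D.insert u [1, 0])
        (fun y => if y = u then 1 else cin y) (fun y => if y = u then 0 else cout y)
        (by
          intro y
          rw [PySem.Dict.get?_insert]
          by_cases hy : y = u
          · subst hy; simp [hkeys]
          · rw [if_neg hy, h y]
            simp only [hkeys]
            by_cases hy' : y ∈ D.keys <;> simp [hy', hy]) x
      rw [this]
      simp only [hkeys, List.mem_cons, List.count_cons]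
      by_cases hxu : x = u
      · subst hxu
        simp [hu]
        ring
      · by_cases hx : x ∈ D.keys <;> simp [hx, hxu, Ne.symm hxu]

-- the state of A's dict after processing a duplicate-free prefix l
lemma pvMain_inv (l : List (Int × List Int)) (hnd : (l.map Prod.fst).Nodup) :
    (l.foldl pvStepA PySem.Dict.empty).keys = PySem.List.dedup (pvChain l) ∧
    ∀ x, (l.foldl pvStepA PySem.Dict.empty).get? x =
      if x ∈ pvChain l then some [((pvFlats l).count x : Int), pvOut l x] else none := by
  induction l using List.reverseRecOn with
  | nil =>
    constructor
    · simp [pvChain, PySem.Dict.keys_empty]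
    · intro x; simp [pvChain, PySem.Dict.get?_empty]
  | append_singleton l p ih =>
    have hnd' : (l.map Prod.fst).Nodup := by
      simpa using (List.nodup_append.mp (by simpa using hnd)).1
    have hv : p.1 ∉ l.map Prod.fst := by
      have := (List.nodup_append.mp (by simpa using hnd)).2.2
      intro hmem
      exact this p.1 hmem p.1 (by simp) rfl
    obtain ⟨ihk, ihg⟩ := ih hnd'
    set D := l.foldl pvStepA PySem.Dict.empty with hD
    rw [List.foldl_append, List.foldl_cons, List.foldl_nil]
    -- step 1: the outer-body insert at v := p.1
    have hOut0 : pvOut l p.1 = 0 := pvOut_eq_zero_of_not_key l p.1 hv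
    have hchainmem : ∀ y, y ∈ D.keys ↔ y ∈ pvChain l := by
      intro y; rw [ihk]; simp
    have hD1 : ∃ D1, (if D.contains p.1 then D.insert p.1 (pvSetOut (p.2.length : Int) (D.getD p.1 []))
        else D.insert p.1 [0, (p.2.length : Int)]) = D1 ∧
        D1 = D.insert p.1 [((pvFlats l).count p.1 : Int), (p.2.length : Int)] := by
      by_cases hc : p.1 ∈ D.keys
      · have hcc : D.contains p.1 = true := by
          rw [PySem.Dict.contains_eq_decide_mem_keys]; simpa using hc
        have hgd : D.getD p.1 [] = [((pvFlats l).count p.1 : Int), 0] := by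
          rw [PySem.Dict.getD_eq_get?_getD, ihg p.1, if_pos ((hchainmem p.1).mp hc), hOut0]; rfl
        refine ⟨_, rfl, ?_⟩
        rw [if_pos hcc, hgd]; rfl
      · have hcc : D.contains p.1 = false := by
          rw [PySem.Dict.contains_eq_decide_mem_keys]; simpa using hc
        have hflat : (pvFlats l).count p.1 = 0 := by
          rw [List.count_eq_zero]
          intro hmem
          exact hc ((hchainmem p.1).mpr (by
            simp only [pvChain, List.mem_flatMap]
            obtain ⟨q, hq, hq2⟩ := List.mem_flatMap.mp hmem
            exact ⟨q, hq, by simp [hq2]⟩))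
        refine ⟨_, rfl, ?_⟩
        rw [if_neg (by simp [hcc]), hflat]; rfl
    obtain ⟨D1, hD1eq, hD1ins⟩ := hD1
    have hkeysD1 : ∀ y, y ∈ D1.keys ↔ y = p.1 ∨ y ∈ pvChain l := by
      intro y
      rw [hD1ins, PySem.Dict.mem_keys_insert]
      simp [hchainmem]
    have hkeys' : ∀ y, y ∈ (D.insert p.1 ([((pvFlats l).count p.1 : Int), (p.2.length : Int)] : List Int)).keys ↔ y = p.1 ∨ y ∈ pvChain l := by
      intro y; rw [← hD1ins]; exact hkeysD1 y
    have hgetD1 : ∀ x, D1.get? x =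
        if x ∈ D1.keys then some [((pvFlats l).count x : Int), pvOut (l ++ [p]) x] else none := by
      intro x
      rw [hD1ins, PySem.Dict.get?_insert]
      by_cases hx : x = p.1
      · subst hx
        rw [if_pos rfl, if_pos ((hkeys' p.1).mpr (Or.inl rfl))]
        have : pvOut (l ++ [p]) p.1 = (p.2.length : Int) := by
          unfold pvOut
          rw [List.find?_append]
          have : l.find? (fun q => q.1 == p.1) = none := by
            rw [List.find?_eq_none]
            intro q hq hbeq
            exact hv (List.mem_map.mpr ⟨q, hq, by simpa using hbeq⟩)
          rw [this]
          simp
        rw [this]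
      · rw [if_neg hx, ihg x]
        have hout : pvOut (l ++ [p]) x = pvOut l x := by
          unfold pvOut
          rw [List.find?_append]
          cases hfind : l.find? (fun q => q.1 == x) with
          | some q => simp
          | none => simp [Ne.symm hx]
        rw [hout]
        by_cases hmem : x ∈ pvChain l
        · rw [if_pos hmem, if_pos ((hkeys' x).mpr (Or.inr hmem))]
        · rw [if_neg hmem, if_neg (fun hh => by rcases (hkeys' x).mp hh with h | h; exact hx h; exact hmem h)]
    have hstepA : pvStepA D p = p.2.foldl pvStepIn D1 := by
      rw [← hD1eq]; rfl
    rw [← hD, hstepA]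
    -- step 2: the inner loop over p.2
    have hin := pvInner_get? p.2 D1 (fun x => ((pvFlats l).count x : Int))
      (fun x => pvOut (l ++ [p]) x) hgetD1
    constructor
    · -- key order
      have : (p.2.foldl pvStepIn D1).keys = PySem.Set.update D1.keys p.2 := by
        have hfun : pvStepIn =
            fun d x => d.insert x (if d.contains x then pvIncIn (d.getD x []) else [1, 0]) :=
          funext fun d => funext fun u => pvStepIn_eq_insert d u
        rw [hfun, PySem.Dict.keys_foldl_insert]
      rw [this]
      have hD1keys : D1.keys = PySem.Set.add D.keys p.1 := by
        rw [hD1ins]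
        by_cases hc : p.1 ∈ D.keys
        · rw [PySem.Dict.keys_insert_of_contains, PySem.Set.add_of_mem hc]
          rw [PySem.Dict.contains_eq_decide_mem_keys]; simpa using hc
        · rw [PySem.Dict.keys_insert_of_not_contains, PySem.Set.add_of_not_mem hc]
          rw [PySem.Dict.contains_eq_decide_mem_keys]; simpa using hc
      rw [hD1keys, ihk]
      have : pvChain (l ++ [p]) = pvChain l ++ (p.1 :: p.2) := by
        simp [pvChain]
      rw [this]
      simp only [PySem.List.dedup_eq_ofList, PySem.Set.ofList_append, PySem.Set.update_cons]
    · intro x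
      rw [hin x]
      have hchainapp : pvChain (l ++ [p]) = pvChain l ++ (p.1 :: p.2) := by simp [pvChain]
      have hmemiff : (x ∈ D1.keys ∨ x ∈ p.2) ↔ x ∈ pvChain (l ++ [p]) := by
        rw [hkeysD1, hchainapp, List.mem_append, List.mem_cons]
        tauto
      have hflats : pvFlats (l ++ [p]) = pvFlats l ++ p.2 := by simp [pvFlats]
      by_cases hmem : x ∈ pvChain (l ++ [p])
      · rw [if_pos (hmemiff.mpr hmem), if_pos hmem]
        by_cases hk : x ∈ D1.keys
        · rw [if_pos hk, if_pos hk, hflats, List.count_append]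
          push_cast; ring_nf
        · have hx2 : x ∈ p.2 := by
            rcases hmemiff.mpr hmem with h | h
            · exact absurd h hk
            · exact h
          rw [if_neg hk, if_neg hk]
          have hnotchain : x ∉ pvChain l := fun hcl => hk ((hkeysD1 x).mpr (Or.inr hcl))
          have hcnt : (pvFlats l).count x = 0 := by
            rw [List.count_eq_zero]
            intro hmemf
            exact hnotchain (by
              simp only [pvChain, List.mem_flatMap]
              obtain ⟨q, hq, hq2⟩ := List.mem_flatMap.mp hmemf
              exact ⟨q, hq, by simp [hq2]⟩)
          have hout0 : pvOut (l ++ [p]) x = 0 := by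
            apply pvOut_eq_zero_of_not_key
            intro hkey
            rcases List.mem_map.mp hkey with ⟨q, hq, hq1⟩
            rcases List.mem_append.mp hq with hql | hqp
            · exact hnotchain (by
                simp only [pvChain, List.mem_flatMap]
                exact ⟨q, hql, by simp [hq1]⟩)
            · have : q = p := by simpa using hqp
              exact hk ((hkeysD1 x).mpr (Or.inl (by rw [← hq1, this])))
          rw [hout0, hflats, List.count_append, hcnt]
          simp
      · rw [if_neg (fun hh => hmem (hmemiff.mp hh)), if_neg hmem]

-- B's out_counts lookup reads off the unique entry of a duplicate-free association list
lemma pvOutCounts_getD (l : List (Int × List Int)) (hnd : (l.map Prod.fst).Nodup) (x : Int) :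
    (PySem.Dict.ofList (l.map (fun p => (p.1, (p.2.length : Int))))).getD x 0 = pvOut l x := by
  induction l using List.reverseRecOn with
  | nil => rfl
  | append_singleton l p ih =>
    have hnd' : (l.map Prod.fst).Nodup := by
      simpa using (List.nodup_append.mp (by simpa using hnd)).1
    have hv : p.1 ∉ l.map Prod.fst := by
      have := (List.nodup_append.mp (by simpa using hnd)).2.2
      intro hmem
      exact this p.1 hmem p.1 (by simp) rfl
    have hstep : PySem.Dict.ofList ((l ++ [p]).map (fun p => (p.1, (p.2.length : Int)))) =
        (PySem.Dict.ofList (l.map (fun p => (p.1, (p.2.length : Int))))).insert p.1 (p.2.length : Int) := by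
      simp only [List.map_append, PySem.Dict.ofList, PySem.Dict.update, List.foldl_append]
      rfl
    rw [hstep, PySem.Dict.getD_eq_get?_getD, PySem.Dict.get?_insert]
    by_cases hx : x = p.1
    · subst hx
      rw [if_pos rfl]
      unfold pvOut
      rw [List.find?_append]
      have : l.find? (fun q => q.1 == p.1) = none := by
        rw [List.find?_eq_none]
        intro q hq hbeq
        exact hv (List.mem_map.mpr ⟨q, hq, by simpa using hbeq⟩)
      rw [this]
      simp
    · rw [if_neg hx, ← PySem.Dict.getD_eq_get?_getD, ih hnd']
      unfold pvOut
      rw [List.find?_append]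
      cases hfind : l.find? (fun q => q.1 == x) with
      | some q => simp
      | none => simp [Ne.symm hx]

-- ===== VERDICT (by name: the statement is the Claim_ definition above) =====
theorem graph_degrees_spec : Claim_equal_graph_degrees := by
  intro graph _hdom hpre
  obtain ⟨-, hnd⟩ := hpre
  unfold Spec_graph_degrees graph_degrees graph_degrees_alt
  obtain ⟨hk, hg⟩ := pvMain_inv graph hnd
  have hknd : (graph.foldl pvStepA PySem.Dict.empty).keys.Nodup := by
    rw [hk]; exact PySem.List.nodup_dedup _
  rw [PySem.Dict.items_eq_map_keys _ hknd ([] : List Int), hk]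
  apply List.map_congr_left
  intro k hkmem
  have hkchain : k ∈ pvChain graph := by
    rw [PySem.List.mem_dedup] at hkmem
    exact hkmem
  have : (graph.foldl pvStepA PySem.Dict.empty).getD k [] =
      [((pvFlats graph).count k : Int), pvOut graph k] := by
    rw [PySem.Dict.getD_eq_get?_getD, hg k, if_pos hkchain]; rfl
  rw [this, PySem.Dict.getD_counter, pvOutCounts_getD graph hnd k]
  rfl
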